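-- pv_equiv track=rewrite | github.com/BUZZARDGTA/amd_adrenalin_control | src/amd_adrenalin_control/main_window.py | _classify_attempted_pids
-- ===== SOURCE A (Python) =====
-- def _classify_attempted_pids(
--
--     attempted_pids: list[int],
--     stopped_pids: set[int],
--     denied_pids: set[int],
-- ) -> tuple[list[int], list[int], list[int]]:
--     """Split attempted pids into closed, denied, and already-gone groups."""
--     stopped_known = [pid for pid in attempted_pids if pid in stopped_pids]
--     denied_known = [pid for pid in attempted_pids if pid in denied_pids]
--     gone_known = [
--         pid for pid in attempted_pids
--         if pid not in stopped_pids
--         and pid not in denied_pids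
--     ]
--     return stopped_known, denied_known, gone_known
-- ===== SOURCE B (Python) =====
-- def _classify_attempted_pids(
--     attempted_pids,
--     stopped_pids,
--     denied_pids,
-- ):
--     """Split attempted pids into closed, denied, and already-gone groups."""
--     stopped_known = []
--     denied_known = []
--     gone_known = []
--     # dispatch table: 2-bit membership code -> buckets that receive the pid
--     targets = (
--         (gone_known,),                    # 0: in neither set
--         (stopped_known,),                 # 1: stopped only
--         (denied_known,),                  # 2: denied only
--         (stopped_known, denied_known),    # 3: in both sets
--     )
--     code = {}  # memoized membership code per distinct pid
--     for pid in attempted_pids: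
--         c = code.get(pid)
--         if c is None:
--             c = (pid in stopped_pids) + 2 * (pid in denied_pids)
--             code[pid] = c
--         for bucket in targets[c]:
--             bucket.append(pid)
--     return stopped_known, denied_known, gone_known
-- ===== Notes on version B (the rewrite author's own statement) =====
-- stated objective: alternative
-- what changed: Instead of three membership-filter passes, B does one pass that memoizes each distinct pid's 2-bit membership code (stopped + 2*denied) in a dict and dispatches appends through a code->buckets table, so duplicate pids never re-test membership and no conditional branch chain classifies them.
import Mathlib
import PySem

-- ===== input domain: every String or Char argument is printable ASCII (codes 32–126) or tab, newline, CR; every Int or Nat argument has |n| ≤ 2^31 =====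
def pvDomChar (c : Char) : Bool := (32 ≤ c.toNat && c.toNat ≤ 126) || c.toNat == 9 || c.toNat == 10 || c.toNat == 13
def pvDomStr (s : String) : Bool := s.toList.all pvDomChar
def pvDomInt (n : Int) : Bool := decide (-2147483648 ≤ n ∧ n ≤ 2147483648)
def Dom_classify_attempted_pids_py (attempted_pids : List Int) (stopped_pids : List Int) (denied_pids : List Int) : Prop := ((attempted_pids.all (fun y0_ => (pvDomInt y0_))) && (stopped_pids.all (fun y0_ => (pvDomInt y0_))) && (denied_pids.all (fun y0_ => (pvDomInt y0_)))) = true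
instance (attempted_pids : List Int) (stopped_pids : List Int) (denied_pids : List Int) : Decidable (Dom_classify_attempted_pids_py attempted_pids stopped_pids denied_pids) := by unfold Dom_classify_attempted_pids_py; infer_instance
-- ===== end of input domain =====

-- B replaces A's three membership-filter passes by one pass that memoizes each distinct
-- pid's 2-bit membership code in a dict and dispatches appends via a code→buckets table.

-- ===== PORT A =====
-- three list comprehensions over attempted_pids
def classify_attempted_pids_py (attempted_pids : List Int) (stopped_pids : List Int) (denied_pids : List Int) : List Int × List Int × List Int :=
  let stopped_known := attempted_pids.filter (fun pid => pid ∈ stopped_pids)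
  let denied_known := attempted_pids.filter (fun pid => pid ∈ denied_pids)
  let gone_known := attempted_pids.filter (fun pid => ¬ pid ∈ stopped_pids ∧ ¬ pid ∈ denied_pids)
  (stopped_known, denied_known, gone_known)

-- ===== PORT B =====
-- one step of B's loop: look the pid's code up in the memo dict (computing and storing it
-- on a miss), then append the pid to the buckets the dispatch table names for that code
-- (code 0 → gone; 1 → stopped; 2 → denied; 3 → stopped and denied)
def classifyStepB (stopped_pids denied_pids : List Int)
    (acc : List Int × List Int × List Int × PySem.Dict Int Int) (pid : Int) :
    List Int × List Int × List Int × PySem.Dict Int Int :=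
  let (s, d, g, code) := acc
  match code.get? pid with
  | some c =>
      if c = 0 then (s, d, g ++ [pid], code)
      else if c = 1 then (s ++ [pid], d, g, code)
      else if c = 2 then (s, d ++ [pid], g, code)
      else (s ++ [pid], d ++ [pid], g, code)
  | none =>
      let c : Int := (if pid ∈ stopped_pids then 1 else 0) + 2 * (if pid ∈ denied_pids then 1 else 0)
      let code := code.insert pid c
      if c = 0 then (s, d, g ++ [pid], code)
      else if c = 1 then (s ++ [pid], d, g, code)
      else if c = 2 then (s, d ++ [pid], g, code)
      else (s ++ [pid], d ++ [pid], g, code)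

def classify_attempted_pids_py_alt (attempted_pids : List Int) (stopped_pids : List Int) (denied_pids : List Int) : List Int × List Int × List Int :=
  let r := attempted_pids.foldl (classifyStepB stopped_pids denied_pids)
    ([], [], [], PySem.Dict.empty)
  (r.1, r.2.1, r.2.2.1)

-- ===== PRECONDITION & SPEC =====
def Spec_classify_attempted_pids_py (attempted_pids : List Int) (stopped_pids : List Int) (denied_pids : List Int) (out : List Int × List Int × List Int) : Prop := out = classify_attempted_pids_py_alt attempted_pids stopped_pids denied_pids
instance (attempted_pids : List Int) (stopped_pids : List Int) (denied_pids : List Int) (out : List Int × List Int × List Int) : Decidable (Spec_classify_attempted_pids_py attempted_pids stopped_pids denied_pids out) := by unfold Spec_classify_attempted_pids_py; infer_instance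

-- ===== CLAIM (what is proved, stated in full; the proofs are below) =====
def Claim_equal_classify_attempted_pids_py : Prop := ∀ (attempted_pids : List Int) (stopped_pids : List Int) (denied_pids : List Int), Dom_classify_attempted_pids_py attempted_pids stopped_pids denied_pids → Spec_classify_attempted_pids_py attempted_pids stopped_pids denied_pids (classify_attempted_pids_py attempted_pids stopped_pids denied_pids)

-- ===== LEMMAS AND PROOFS =====

-- the true 2-bit membership code of a pid
def trueCode (sp dp : List Int) (pid : Int) : Int :=
  (if pid ∈ sp then 1 else 0) + 2 * (if pid ∈ dp then 1 else 0)

-- the memo dict only ever holds true codes, so B's fold from any correct accumulator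
-- extends the three buckets exactly by A's three filters
theorem classify_fold_eq (sp dp : List Int) (ap : List Int)
    (s d g : List Int) (code : PySem.Dict Int Int)
    (hcode : ∀ p v, code.get? p = some v → v = trueCode sp dp p) :
    ap.foldl (classifyStepB sp dp) (s, d, g, code)
    = (s ++ ap.filter (fun pid => pid ∈ sp),
       d ++ ap.filter (fun pid => pid ∈ dp),
       g ++ ap.filter (fun pid => ¬ pid ∈ sp ∧ ¬ pid ∈ dp),
       (ap.foldl (classifyStepB sp dp) (s, d, g, code)).2.2.2) := by
  induction ap generalizing s d g code with
  | nil => simp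
  | cons x xs ih =>
    have hstep : ∀ code' : PySem.Dict Int Int,
        (∀ p v, code'.get? p = some v → v = trueCode sp dp p) →
        xs.foldl (classifyStepB sp dp)
          (if trueCode sp dp x = 0 then (s, d, g ++ [x], code')
           else if trueCode sp dp x = 1 then (s ++ [x], d, g, code')
           else if trueCode sp dp x = 2 then (s, d ++ [x], g, code')
           else (s ++ [x], d ++ [x], g, code'))
        = (s ++ List.filter (fun pid => decide (pid ∈ sp)) (x :: xs),
           d ++ List.filter (fun pid => decide (pid ∈ dp)) (x :: xs),
           g ++ List.filter (fun pid => decide (¬ pid ∈ sp ∧ ¬ pid ∈ dp)) (x :: xs),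
           (xs.foldl (classifyStepB sp dp)
             (if trueCode sp dp x = 0 then (s, d, g ++ [x], code')
              else if trueCode sp dp x = 1 then (s ++ [x], d, g, code')
              else if trueCode sp dp x = 2 then (s, d ++ [x], g, code')
              else (s ++ [x], d ++ [x], g, code'))).2.2.2) := by
      intro code' hc'
      by_cases hs : x ∈ sp <;> by_cases hd : x ∈ dp <;>
        · norm_num [trueCode, hs, hd]
          rw [ih _ _ _ _ hc']
          simp
    simp only [List.foldl_cons]
    cases hget : PySem.Dict.get? code x with
    | some v =>
        have hv := hcode _ _ hget
        subst hv
        simpa [classifyStepB, hget] using hstep code hcode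
    | none =>
        have hc' : ∀ p v, (code.insert x (trueCode sp dp x)).get? p = some v →
            v = trueCode sp dp p := by
          intro p v hpv
          rcases eq_or_ne p x with rfl | hne
          · rw [PySem.Dict.get?_insert_self] at hpv
            exact (Option.some.inj hpv).symm
          · rw [PySem.Dict.get?_insert_of_ne _ _ hne] at hpv
            exact hcode _ _ hpv
        simpa [classifyStepB, hget, trueCode] using
          hstep (code.insert x (trueCode sp dp x)) hc'

-- ===== VERDICT (by name: the statement is the Claim_ definition above) =====
theorem classify_attempted_pids_py_spec : Claim_equal_classify_attempted_pids_py := by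
  intro ap sp dp _
  unfold Spec_classify_attempted_pids_py classify_attempted_pids_py classify_attempted_pids_py_alt
  rw [classify_fold_eq sp dp ap [] [] [] PySem.Dict.empty
    (by intro p v h; simp [PySem.Dict.get?_empty] at h)]
  simp
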